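-- pv_equiv track=rewrite | github.com/NECKTER/148_Homework | Nicholas_Scheele/TCPserver.py | countBetweenSpace
-- ===== SOURCE A (Python) =====
-- def countBetweenSpace(message):
--     i = 0
--     result = ''
--     for ch in message:
--         if (chr(ch) == ' ') or (chr(ch) == '\n'):
--             result += str(i) + ' '
--             i = 0
--             if chr(ch) == '\n':
--                 result += '\n'
--         else:
--             i += 1
--     if i > 0:
--         result += str(i)
--     return result
-- ===== SOURCE B (Python) =====
-- def countBetweenSpace(message):
--     # Two-phase: collect delimiter positions first, then emit each count as a
--     # gap between consecutive delimiter positions.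
--     pos = [(p, ch) for p, ch in enumerate(message) if chr(ch) in (' ', '\n')]
--     result = ''
--     prev = -1
--     for p, ch in pos:
--         result += str(p - prev - 1) + ' '
--         if chr(ch) == '\n':
--             result += '\n'
--         prev = p
--     tail = len(message) - prev - 1
--     if tail > 0:
--         result += str(tail)
--     return result
-- ===== Notes on version B (the rewrite author's own statement) =====
-- stated objective: alternative
-- what changed: B first builds the list of delimiter positions (one filter pass over enumerate), then emits each count as the arithmetic gap between consecutive delimiter positions, instead of A's running character counter reset at every delimiter.
import Mathlib
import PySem

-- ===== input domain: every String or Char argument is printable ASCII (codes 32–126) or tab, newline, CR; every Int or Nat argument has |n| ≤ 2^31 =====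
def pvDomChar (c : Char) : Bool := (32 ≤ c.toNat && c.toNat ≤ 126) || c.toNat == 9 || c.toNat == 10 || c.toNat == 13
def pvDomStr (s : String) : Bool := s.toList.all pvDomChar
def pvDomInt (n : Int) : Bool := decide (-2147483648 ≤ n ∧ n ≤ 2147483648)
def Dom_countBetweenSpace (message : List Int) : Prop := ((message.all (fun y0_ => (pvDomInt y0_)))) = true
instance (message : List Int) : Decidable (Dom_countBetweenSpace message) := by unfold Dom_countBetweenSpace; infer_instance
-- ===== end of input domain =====

-- B replaces A's running reset counter by a delimiter-position table and gap arithmetic (objective: alternative, same cost).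

-- ===== PORT A =====
-- chr(ch) == ' ' / '\n' is ported as ch == 32 / ch == 10, exact for 0 ≤ ch ≤ 0x10FFFF (Pre_).
def countBetweenSpace (message : List Int) : String :=
  let st := message.foldl (fun (st : Int × String) ch =>
      if ch == 32 || ch == 10 then
        let res := st.2 ++ PySem.Int.toStr st.1 ++ " "
        let res := if ch == 10 then res ++ "\n" else res
        (0, res)
      else (st.1 + 1, st.2)) (0, "")
  if st.1 > 0 then st.2 ++ PySem.Int.toStr st.1 else st.2

-- ===== PORT B =====
def countBetweenSpace_alt (message : List Int) : String :=
  let pos := (PySem.List.enumerate message 0).filter (fun pc => pc.2 == 32 || pc.2 == 10)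
  let st := pos.foldl (fun (st : String × Int) pc =>
      let res := st.1 ++ PySem.Int.toStr (pc.1 - st.2 - 1) ++ " "
      let res := if pc.2 == 10 then res ++ "\n" else res
      (res, pc.1)) ("", -1)
  let tail := (message.length : Int) - st.2 - 1
  if tail > 0 then st.1 ++ PySem.Int.toStr tail else st.1

-- ===== PRECONDITION & SPEC =====
-- Pre_ excludes exactly the inputs on which Python's chr(ch) raises ValueError (ch < 0 or ch > 0x10FFFF); both A and B raise there.
def Pre_countBetweenSpace (message : List Int) : Prop :=
  ∀ ch ∈ message, 0 ≤ ch ∧ ch ≤ 1114111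
instance (message : List Int) : Decidable (Pre_countBetweenSpace message) := by
  unfold Pre_countBetweenSpace; infer_instance
def pvWitness_countBetweenSpace : List Int := [104, 105, 32, 97, 10, 98, 98]
def Spec_countBetweenSpace (message : List Int) (out : String) : Prop := out = countBetweenSpace_alt message
instance (message : List Int) (out : String) : Decidable (Spec_countBetweenSpace message out) := by unfold Spec_countBetweenSpace; infer_instance

-- ===== CLAIM (what is proved, stated in full; the proofs are below) =====
def Claim_equal_countBetweenSpace : Prop := ∀ (message : List Int), Dom_countBetweenSpace message → Pre_countBetweenSpace message → Spec_countBetweenSpace message (countBetweenSpace message)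

-- ===== LEMMAS AND PROOFS =====

-- Invariant relating A's fold (counter, result) to B's fold over the filtered enumeration:
-- if B's prev = s - i - 1, the folds stay in lock step; A's final counter equals B's tail gap.
theorem pvFoldRel (msg : List Int) : ∀ (s i : Int) (res : String),
    msg.foldl (fun (st : Int × String) ch =>
      if ch == 32 || ch == 10 then
        let r := st.2 ++ PySem.Int.toStr st.1 ++ " "
        let r := if ch == 10 then r ++ "\n" else r
        (0, r)
      else (st.1 + 1, st.2)) (i, res)
    =
    (let st := ((PySem.List.enumerate msg s).filter (fun pc => pc.2 == 32 || pc.2 == 10)).foldl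
        (fun (st : String × Int) pc =>
          let r := st.1 ++ PySem.Int.toStr (pc.1 - st.2 - 1) ++ " "
          let r := if pc.2 == 10 then r ++ "\n" else r
          (r, pc.1)) (res, s - i - 1)
     (s + msg.length - st.2 - 1, st.1)) := by
  induction msg with
  | nil =>
    intro s i res
    simp [PySem.List.enumerate_nil]
    omega
  | cons ch rest ih =>
    intro s i res
    by_cases h : (ch == 32 || ch == 10) = true
    · simp only [List.foldl_cons, h, if_pos, PySem.List.enumerate_cons, List.filter_cons,
        List.foldl_cons]
      rw [ih (s + 1) 0]
      have harg : s - (s - i - 1) - 1 = i := by ring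
      have hprev : (s + 1 : Int) - 0 - 1 = s := by ring
      simp only [harg, hprev]
      congr 1
      simp only [List.length_cons]; push_cast; ring
    · simp only [List.foldl_cons, h, if_neg, Bool.not_eq_true, PySem.List.enumerate_cons,
        List.filter_cons]
      rw [ih (s + 1) (i + 1)]
      have hprev : (s + 1 : Int) - (i + 1) - 1 = s - i - 1 := by ring
      simp only [hprev]
      congr 1
      simp only [List.length_cons]; push_cast; ring

-- ===== VERDICT (by name: the statement is the Claim_ definition above) =====
theorem countBetweenSpace_spec : Claim_equal_countBetweenSpace := by
  intro message _ _
  unfold Spec_countBetweenSpace countBetweenSpace countBetweenSpace_alt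
  rw [pvFoldRel message 0 0 ""]
  simp only []
  have h0 : (0 : Int) - 0 - 1 = -1 := by ring
  rw [h0]
  simp only [zero_add]
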